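-- pv_equiv track=rewrite | github.com/yoav8000/IPQueryProject | MarkdownFormatter.py | find_max_length_in_dict
-- ===== SOURCE A (Python) =====
-- def find_max_length_in_dict(current_dict):
--     """
--     The method finds the maximum length of a dictionary (from the keys and
--     values).
--     :param current_dict: the dictionary that holds the information.
--     :return: the method return the maximum length.
--     """
--     max_key_length = max(len(key) for key in current_dict)
--     max_val_key = max(current_dict, key=lambda k: len(current_dict[k]))
--     max_value_length = len(current_dict[max_val_key])
--     if max_key_length > max_value_length:
--         return max_key_length
--     else:
--         return max_value_length
-- ===== SOURCE B (Python) =====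
-- def find_max_length_in_dict(current_dict):
--     return max(max(len(k), len(v)) for k, v in current_dict.items())
-- ===== Notes on version B (the rewrite author's own statement) =====
-- stated objective: simpler
-- what changed: A scans the keys once for the longest key, then scans the keys again with a key= lambda doing a dict lookup per key to find the key with the longest value, then compares the two results; B replaces the three computations by a single pass over items() taking max(len(k), len(v)) per pair, with no lookups and no final comparison.
import Mathlib
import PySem

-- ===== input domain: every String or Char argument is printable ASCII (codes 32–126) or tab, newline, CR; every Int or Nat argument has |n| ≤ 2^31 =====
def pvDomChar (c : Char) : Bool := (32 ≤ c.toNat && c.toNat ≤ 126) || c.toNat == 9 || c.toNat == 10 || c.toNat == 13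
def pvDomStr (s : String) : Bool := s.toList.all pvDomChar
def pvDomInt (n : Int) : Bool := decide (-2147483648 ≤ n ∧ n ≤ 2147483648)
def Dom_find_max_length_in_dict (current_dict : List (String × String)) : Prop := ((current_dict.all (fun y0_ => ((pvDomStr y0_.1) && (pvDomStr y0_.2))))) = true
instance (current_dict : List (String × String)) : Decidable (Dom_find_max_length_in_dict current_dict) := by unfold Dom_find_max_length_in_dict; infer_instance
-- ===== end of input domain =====

-- B replaces A's two key scans (one with a per-key dict lookup) and final comparison by one
-- pass over the items taking max(len key, len value) per pair; objective: simpler.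


-- ===== PORT A =====
-- current_dict[k]: first-match lookup in the association list (exact for a Python dict,
-- whose keys are unique; Pre_ requires Nodup keys)
def pvLookupD (d : List (String × String)) (k : String) : String :=
  ((d.find? (fun kv => kv.1 == k)).map Prod.snd).getD ""

def find_max_length_in_dict (current_dict : List (String × String)) : Int :=
  match PySem.List.max? (current_dict.map (fun kv => PySem.Str.len kv.1)) (fun x => x),
        PySem.List.max? (current_dict.map Prod.fst)
          (fun k => PySem.Str.len (pvLookupD current_dict k)) with
  | some max_key_length, some max_val_key =>
      let max_value_length := PySem.Str.len (pvLookupD current_dict max_val_key)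
      if max_key_length > max_value_length then max_key_length else max_value_length
  | _, _ => 0  -- unreachable under Pre_: Python's max raises ValueError on an empty dict

-- ===== PORT B =====
def find_max_length_in_dict_alt (current_dict : List (String × String)) : Int :=
  match PySem.List.max?
      (current_dict.map (fun kv => max (PySem.Str.len kv.1) (PySem.Str.len kv.2)))
      (fun x => x) with
  | some m => m
  | none => 0  -- unreachable under Pre_: Python's max raises ValueError on an empty dict

-- ===== PRECONDITION & SPEC =====
-- Pre_ excludes the empty dict, on which A (and B) raise ValueError, and association lists
-- with duplicate keys, which a Python dict cannot hold (an artefact of the list encoding).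
def Pre_find_max_length_in_dict (current_dict : List (String × String)) : Prop :=
  current_dict ≠ [] ∧ (current_dict.map Prod.fst).Nodup
instance (current_dict : List (String × String)) : Decidable (Pre_find_max_length_in_dict current_dict) := by unfold Pre_find_max_length_in_dict; infer_instance

def pvWitness_find_max_length_in_dict : (List (String × String)) := [("ab", "c"), ("d", "efgh")]

def Spec_find_max_length_in_dict (current_dict : List (String × String)) (out : Int) : Prop := out = find_max_length_in_dict_alt current_dict
instance (current_dict : List (String × String)) (out : Int) : Decidable (Spec_find_max_length_in_dict current_dict out) := by unfold Spec_find_max_length_in_dict; infer_instance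

-- ===== CLAIM (what is proved, stated in full; the proofs are below) =====
def Claim_equal_find_max_length_in_dict : Prop := ∀ (current_dict : List (String × String)), Dom_find_max_length_in_dict current_dict → Pre_find_max_length_in_dict current_dict → Spec_find_max_length_in_dict current_dict (find_max_length_in_dict current_dict)

-- ===== LEMMAS AND PROOFS =====

-- with Nodup keys, the first-match lookup of a pair's key returns that pair's value
theorem pvLookupD_eq {d : List (String × String)} (hnd : (d.map Prod.fst).Nodup)
    {q : String × String} (hq : q ∈ d) : pvLookupD d q.1 = q.2 := by
  induction d with
  | nil => cases hq
  | cons p t ih =>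
    simp only [List.map_cons, List.nodup_cons] at hnd
    rcases List.mem_cons.mp hq with rfl | hq'
    · simp [pvLookupD]
    · have hne : (p.1 == q.1) = false := by
        simp only [beq_eq_false_iff_ne]
        intro h
        exact hnd.1 (h ▸ List.mem_map_of_mem hq')
      simp only [pvLookupD, List.find?_cons, hne]
      exact ih hnd.2 hq'

-- a running max of a projection over p :: t: an upper bound, attained at some member
theorem foldl_max_map_spec {α : Type} (f : α → Int) (p : α) (t : List α) :
    (∀ q ∈ p :: t, f q ≤ (t.map f).foldl max (f p)) ∧
    ∃ q ∈ p :: t, (t.map f).foldl max (f p) = f q := by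
  constructor
  · intro q hq
    rcases List.mem_cons.mp hq with rfl | hq'
    · exact (PySem.List.le_foldl_max _ _).1
    · exact (PySem.List.le_foldl_max _ _).2 _ (List.mem_map_of_mem hq')
  · rcases PySem.List.foldl_max_mem (t.map f) (f p) with h | h
    · exact ⟨p, List.mem_cons_self, h⟩
    · rcases List.mem_map.mp h with ⟨q, hq, heq⟩
      exact ⟨q, List.mem_cons_of_mem _ hq, heq.symm⟩

-- ===== VERDICT (by name: the statement is the Claim_ definition above) =====
theorem find_max_length_in_dict_spec : Claim_equal_find_max_length_in_dict := by
  intro d _ hpre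
  obtain ⟨hne, hnd⟩ := hpre
  obtain ⟨p, t, rfl⟩ := List.exists_cons_of_ne_nil hne
  unfold Spec_find_max_length_in_dict
  rcases h2 : PySem.List.max? ((p :: t).map Prod.fst)
      (fun k => PySem.Str.len (pvLookupD (p :: t) k)) with _ | mvk
  · exact absurd ((PySem.List.max?_eq_none_iff _ _).mp h2) (by simp)
  simp only [find_max_length_in_dict, find_max_length_in_dict_alt, List.map_cons] at h2 ⊢
  rw [PySem.List.max?_id_cons, PySem.List.max?_id_cons, h2]
  dsimp only
  -- facts about the two running maxima
  obtain ⟨hAbd, qA, hqA, hA⟩ := foldl_max_map_spec (fun kv => PySem.Str.len kv.1) p t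
  obtain ⟨hBbd, qB, hqB, hB⟩ := foldl_max_map_spec
    (fun kv => max (PySem.Str.len kv.1) (PySem.Str.len kv.2)) p t
  -- names for the three quantities
  set A1 := (t.map (fun kv => PySem.Str.len kv.1)).foldl max (PySem.Str.len p.1) with hA1
  set B1 := (t.map (fun kv => max (PySem.Str.len kv.1) (PySem.Str.len kv.2))).foldl max
      (max (PySem.Str.len p.1) (PySem.Str.len p.2)) with hB1
  set mv := PySem.Str.len (pvLookupD (p :: t) mvk) with hmv
  -- mv is attained: the arg-max key is some pair's key
  have hmem : mvk ∈ (p :: t).map Prod.fst := by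
    have := PySem.List.max?_mem h2
    simpa using this
  obtain ⟨qV, hqV, hqV1⟩ := List.mem_map.mp hmem
  have hmvEq : mv = PySem.Str.len qV.2 := by
    rw [hmv, ← hqV1, pvLookupD_eq hnd hqV]
  -- mv bounds every value length
  have hVbd : ∀ q ∈ p :: t, PySem.Str.len q.2 ≤ mv := by
    intro q hq
    have hq1 : q.1 ∈ p.1 :: t.map Prod.fst := by
      rcases List.mem_cons.mp hq with rfl | hq'
      · exact List.mem_cons_self
      · exact List.mem_cons_of_mem _ (List.mem_map_of_mem hq')
    have := PySem.List.max?_isMax h2 q.1 (by simpa using hq1)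
    rwa [pvLookupD_eq hnd hq] at this
  -- A1 ≤ B1 and mv ≤ B1
  have hA1B : A1 ≤ B1 :=
    hA ▸ le_trans (le_max_left _ (PySem.Str.len qA.2)) (hBbd qA hqA)
  have hmvB : mv ≤ B1 :=
    hmvEq ▸ le_trans (le_max_right (PySem.Str.len qV.1) _) (hBbd qV hqV)
  -- B1 ≤ max A1 mv
  have hB1a : PySem.Str.len qB.1 ≤ A1 := hAbd qB hqB
  have hB1v : PySem.Str.len qB.2 ≤ mv := hVbd qB hqB
  rcases max_choice (PySem.Str.len qB.1) (PySem.Str.len qB.2) with hm | hm <;>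
    rw [hm] at hB <;> split_ifs <;> omega
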